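-- pv_equiv track=rewrite | github.com/tohsin/Data-structuturess-and-Algorithms | foo bar/bringing_a_gun.py | projections
-- ===== SOURCE A (Python) =====
-- def mirror(position, dim,mirror):
--     answer=position
--     rotation=[2*position, 2*(dim-position)]
--     if mirror<0:
--         for i in range(mirror, 0):
--             answer -= rotation[(i+1)%2]
--     else:
--         for i in range(mirror, 0, -1):
--             answer += rotation[i%2]
--     return answer
--
-- def projections(pos, dim, distance):
--     mirrored=[]
--     for i in range(len(pos)):
--         points=[]
--         for j in range(-(distance//dim[i])-1, (distance//dim[i]+2)):
--             points.append(mirror( pos[i], dim[i],j))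
--         mirrored.append(points)
--     return mirrored
-- ===== SOURCE B (Python) =====
-- def projections(pos, dim, distance):
--     # Closed-form mirror image: even j -> p + j*d, odd j -> (j+1)*d - p.
--     return [[p + j * d if j % 2 == 0 else (j + 1) * d - p
--              for j in range(-(distance // d) - 1, distance // d + 2)]
--             for p, d in zip(pos, dim)]
-- ===== Notes on version B (the rewrite author's own statement) =====
-- stated objective: alternative
-- what changed: Each mirrored point is computed by a closed-form affine formula (even j: p+j*d, odd j: (j+1)*d-p) instead of A's per-point loop that accumulates +/- rotation terms |j| times; the index loop over positions becomes a comprehension over zip(pos, dim). (Fewer operations per point, but total time is dominated by the size of the output.)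
import Mathlib
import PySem

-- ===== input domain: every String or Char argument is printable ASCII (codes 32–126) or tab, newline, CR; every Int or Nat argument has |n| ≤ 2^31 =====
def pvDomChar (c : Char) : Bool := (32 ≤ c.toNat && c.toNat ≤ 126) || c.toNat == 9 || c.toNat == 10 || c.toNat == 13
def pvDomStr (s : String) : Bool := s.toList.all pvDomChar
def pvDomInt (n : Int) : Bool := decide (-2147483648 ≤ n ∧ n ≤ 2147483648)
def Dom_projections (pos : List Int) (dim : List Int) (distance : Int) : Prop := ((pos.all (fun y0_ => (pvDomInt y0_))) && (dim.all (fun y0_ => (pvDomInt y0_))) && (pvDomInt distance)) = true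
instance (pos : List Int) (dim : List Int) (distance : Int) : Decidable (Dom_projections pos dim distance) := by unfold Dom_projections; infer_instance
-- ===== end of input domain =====

-- B replaces A's per-point accumulation loop by a closed-form affine formula for each mirror image.

-- ===== PORT A =====
-- literal port of `mirror` from Source A
def mirrorA (position : Int) (dim : Int) (m : Int) : Int :=
  let rotation : List Int := [2 * position, 2 * (dim - position)]
  if m < 0 then
    (PySem.List.pyRange m 0 1).foldl
      (fun answer i => answer - PySem.List.pyGetD rotation (PySem.Int.mod (i + 1) 2) 0) position
  else
    (PySem.List.pyRange m 0 (-1)).foldl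
      (fun answer i => answer + PySem.List.pyGetD rotation (PySem.Int.mod i 2) 0) position

def projections (pos : List Int) (dim : List Int) (distance : Int) : List (List Int) :=
  (PySem.List.pyRange 0 pos.length 1).foldl
    (fun mirrored i =>
      let q := PySem.Int.floordiv distance (PySem.List.pyGetD dim i 0)
      let points := (PySem.List.pyRange (-q - 1) (q + 2) 1).foldl
        (fun points j => points ++ [mirrorA (PySem.List.pyGetD pos i 0) (PySem.List.pyGetD dim i 0) j]) []
      mirrored ++ [points]) []

-- ===== PORT B =====
-- closed-form mirror: even j ↦ p + j*d, odd j ↦ (j+1)*d - p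
def mirrorB (p : Int) (d : Int) (j : Int) : Int :=
  if PySem.Int.mod j 2 = 0 then p + j * d else (j + 1) * d - p

def projections_alt (pos : List Int) (dim : List Int) (distance : Int) : List (List Int) :=
  (pos.zip dim).map (fun pd =>
    (PySem.List.pyRange (-(PySem.Int.floordiv distance pd.2) - 1)
                        (PySem.Int.floordiv distance pd.2 + 2) 1).map
      (fun j => mirrorB pd.1 pd.2 j))

-- ===== PRECONDITION & SPEC =====
-- Pre_ excludes exactly the inputs where A raises: dim shorter than pos (IndexError) or a zero
-- dimension used by some position (ZeroDivisionError).
def Pre_projections (pos : List Int) (dim : List Int) (distance : Int) : Prop :=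
  pos.length ≤ dim.length ∧ ∀ d ∈ dim.take pos.length, d ≠ 0
instance (pos : List Int) (dim : List Int) (distance : Int) : Decidable (Pre_projections pos dim distance) := by unfold Pre_projections; infer_instance

def pvWitness_projections : List Int × List Int × Int := ([2, 1], [3, 4], 7)

def Spec_projections (pos : List Int) (dim : List Int) (distance : Int) (out : List (List Int)) : Prop := out = projections_alt pos dim distance
instance (pos : List Int) (dim : List Int) (distance : Int) (out : List (List Int)) : Decidable (Spec_projections pos dim distance out) := by unfold Spec_projections; infer_instance

-- ===== CLAIM (what is proved, stated in full; the proofs are below) =====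
def Claim_equal_projections : Prop := ∀ (pos : List Int) (dim : List Int) (distance : Int), Dom_projections pos dim distance → Pre_projections pos dim distance → Spec_projections pos dim distance (projections pos dim distance)

-- ===== LEMMAS AND PROOFS =====

-- the "upward" loop of mirror (m ≥ 0): accumulate backwards from m down to 1
theorem mirror_up (p d : Int) (m : Int) (hm : 0 ≤ m) : ∀ acc : Int,
    (PySem.List.pyRange m 0 (-1)).foldl
      (fun answer i => answer + PySem.List.pyGetD [2 * p, 2 * (d - p)] (PySem.Int.mod i 2) 0) acc
    = acc + (if m % 2 = 0 then m * d else (m + 1) * d - 2 * p) := by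
  induction m, hm using Int.le_induction with
  | base =>
    intro acc
    rw [PySem.List.pyRange_neg_one_eq_nil le_rfl]
    simp
  | succ n hn ih =>
    intro acc
    rw [PySem.List.pyRange_neg_one_cons (by omega)]
    simp only [List.foldl_cons]
    rw [show n + 1 - 1 = n by ring, ih]
    rw [PySem.Int.mod_eq_emod_of_pos (by omega)]
    rcases Int.emod_two_eq n with h | h
    · have h1 : (n + 1) % 2 = 1 := by omega
      simp [pysem, h, h1]
      try ring
    · have h1 : (n + 1) % 2 = 0 := by omega
      simp [pysem, h, h1]
      try ring

-- the "downward" loop of mirror (m = -n < 0): subtract from -n up to -1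
theorem mirror_down (p d : Int) (n : Int) (hn : 0 ≤ n) : ∀ acc : Int,
    (PySem.List.pyRange (-n) 0 1).foldl
      (fun answer i => answer - PySem.List.pyGetD [2 * p, 2 * (d - p)] (PySem.Int.mod (i + 1) 2) 0) acc
    = acc - (if n % 2 = 0 then n * d else 2 * p + (n - 1) * d) := by
  induction n, hn using Int.le_induction with
  | base =>
    intro acc
    rw [show -(0:Int) = 0 by ring, PySem.List.pyRange_one_eq_nil le_rfl]
    simp
  | succ n hn ih =>
    intro acc
    rw [PySem.List.pyRange_one_cons (by omega)]
    simp only [List.foldl_cons]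
    rw [show -(n + 1) + 1 = -n by ring, ih]
    rw [PySem.Int.mod_eq_emod_of_pos (by omega)]
    rcases Int.emod_two_eq n with h | h
    · have h0 : (-n) % 2 = 0 := by omega
      have h1 : (n + 1) % 2 = 1 := by omega
      simp [pysem, h, h0, h1]
      try ring
    · have h0 : (-n) % 2 = 1 := by omega
      have h1 : (n + 1) % 2 = 0 := by omega
      simp [pysem, h, h0, h1]
      try ring

-- the accumulation loops of A's mirror compute B's closed form
theorem mirror_eq (p d m : Int) : mirrorA p d m = mirrorB p d m := by
  unfold mirrorA mirrorB
  rw [PySem.Int.mod_eq_emod_of_pos (show (0:Int) < 2 by omega)]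
  by_cases hm : m < 0
  · simp only [if_pos hm]
    have := mirror_down p d (-m) (by omega) p
    rw [show -(-m) = m by ring] at this
    rw [this]
    have hpar : (-m) % 2 = m % 2 := by omega
    rcases Int.emod_two_eq m with h | h
    · rw [hpar, h]; simp [h]; try ring
    · rw [hpar, h]; simp [h]; try ring
  · simp only [if_neg hm]
    rw [mirror_up p d m (by omega) p]
    rcases Int.emod_two_eq m with h | h
    · simp [h]
    · simp [h]; try ring

-- the inner index loop of A equals B's comprehension for one (p, d) pair
theorem inner_eq (p d distance : Int) :
    (PySem.List.pyRange (-(PySem.Int.floordiv distance d) - 1) (PySem.Int.floordiv distance d + 2) 1).foldl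
      (fun points j => points ++ [mirrorA p d j]) []
    = (PySem.List.pyRange (-(PySem.Int.floordiv distance d) - 1) (PySem.Int.floordiv distance d + 2) 1).map
      (fun j => mirrorB p d j) := by
  rw [PySem.List.foldl_append_singleton_eq_map]
  simp [mirror_eq]

theorem projections_spec : Claim_equal_projections := by
  intro pos dim distance _ hpre
  obtain ⟨hlen, hnz⟩ := hpre
  show projections pos dim distance = projections_alt pos dim distance
  unfold projections projections_alt
  rw [PySem.List.foldl_append_singleton_eq_map]
  apply List.ext_getElem
  · simp only [List.nil_append, List.length_map, PySem.List.length_pyRange_one, List.length_zip]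
    omega
  · intro k hk1 hk2
    have hkpos : k < pos.length := by
      simp [PySem.List.length_pyRange_one] at hk1
      omega
    have hkdim : k < dim.length := by omega
    simp only [List.nil_append, List.getElem_map, List.getElem_zip]
    rw [PySem.List.getElem_pyRange_one]
    simp only [zero_add, PySem.List.pyGetD_natCast]
    rw [List.getD_eq_getElem pos 0 hkpos, List.getD_eq_getElem dim 0 hkdim]
    rw [inner_eq]
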